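-- pv_equiv track=rewrite | github.com/yo-mi2027/mcp_v2 | src/mcp_v2_server/manual_index.py | _compute_line_end
-- ===== SOURCE A (Python) =====
-- def _compute_line_end(lines: list[str], headings: list[tuple[int, int, str]]) -> list[int]:
--     if not headings:
--         return [len(lines)]
--     ends: list[int] = []
--     for idx, (start, level, _) in enumerate(headings):
--         end = len(lines)
--         for j in range(idx + 1, len(headings)):
--             next_start, next_level, _ = headings[j]
--             if next_level <= level:
--                 end = next_start - 1
--                 break
--         ends.append(max(start, end))
--     return ends
-- ===== SOURCE B (Python) =====
-- def _compute_line_end(lines: list[str], headings: list[tuple[int, int, str]]) -> list[int]: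
--     if not headings:
--         return [len(lines)]
--     n = len(lines)
--     stack: list[tuple[int, int]] = []  # (start, level), levels strictly increasing toward the top
--     ends: list[int] = []
--     for start, level, _ in reversed(headings):
--         while stack and stack[-1][1] > level:
--             stack.pop()
--         end = stack[-1][0] - 1 if stack else n
--         ends.append(max(start, end))
--         stack.append((start, level))
--     ends.reverse()
--     return ends
-- ===== Notes on version B (the rewrite author's own statement) =====
-- stated objective: alternative
-- what changed: Replaces A's per-heading forward scan for the next heading of equal-or-shallower level by a single right-to-left pass maintaining a monotonic stack of (start, level) pairs; it avoids A's quadratic worst case but was not measurably faster on the timing inputs, where A's scan breaks early.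
import Mathlib
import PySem

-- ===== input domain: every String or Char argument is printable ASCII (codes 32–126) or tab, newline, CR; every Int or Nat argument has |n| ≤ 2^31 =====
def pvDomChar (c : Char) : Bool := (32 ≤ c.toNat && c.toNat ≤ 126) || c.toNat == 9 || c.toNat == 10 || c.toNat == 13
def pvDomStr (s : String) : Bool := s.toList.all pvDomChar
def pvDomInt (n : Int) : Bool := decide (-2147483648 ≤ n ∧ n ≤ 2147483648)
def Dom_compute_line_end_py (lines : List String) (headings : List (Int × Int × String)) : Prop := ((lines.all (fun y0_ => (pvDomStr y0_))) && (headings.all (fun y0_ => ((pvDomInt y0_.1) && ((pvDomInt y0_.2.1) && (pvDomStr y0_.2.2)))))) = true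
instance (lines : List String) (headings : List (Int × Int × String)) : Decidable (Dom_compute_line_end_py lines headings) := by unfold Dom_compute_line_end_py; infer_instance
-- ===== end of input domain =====

-- B replaces A's per-heading forward scan by one right-to-left pass with a
-- monotonic stack of (start, level) pairs (objective: alternative algorithm).

-- ===== PORT A =====
-- A's inner loop: 'for j in range(idx+1, len(headings)): … if next_level <= level: end = …; break'
-- (the pyGet? none branch is unreachable: every j lies in range)
def aInner (headings : List (Int × Int × String)) (level : Int) (endv : Int)
    (js : List Int) : Int :=
  match js with
  | [] => endv
  | j :: rest =>
    match PySem.List.pyGet? headings j with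
    | none => endv
    | some (next_start, next_level, _) =>
      if next_level ≤ level then next_start - 1
      else aInner headings level endv rest

def compute_line_end_py (lines : List String) (headings : List (Int × Int × String)) : List Int :=
  if headings = [] then [(lines.length : Int)]
  else
    (PySem.List.enumerate headings 0).foldl
      (fun ends p =>
        ends ++ [max p.2.1
          (aInner headings p.2.2.1 (lines.length : Int)
            (PySem.List.pyRange (p.1 + 1) (headings.length : Int) 1))]) []

-- ===== PORT B =====
-- 'while stack and stack[-1][1] > level: stack.pop()'  (stack top = list head)
def bPop (level : Int) : List (Int × Int) → List (Int × Int)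
  | [] => []
  | (s, l) :: rest => if l > level then bPop level rest else (s, l) :: rest

-- the right-to-left loop over reversed(headings); consing onto acc realises
-- Python's append-then-final-reverse of `ends`
-- 'end = stack[-1][0] - 1 if stack else n'
def bEnd (n : Int) : List (Int × Int) → Int
  | [] => n
  | (s, _) :: _ => s - 1

def bGo (n : Int) (stack : List (Int × Int)) (acc : List Int) :
    List (Int × Int × String) → List Int
  | [] => acc
  | (start, level, _) :: rest =>
    let st := bPop level stack
    bGo n ((start, level) :: st) (max start (bEnd n st) :: acc) rest

def compute_line_end_py_alt (lines : List String) (headings : List (Int × Int × String)) : List Int :=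
  if headings = [] then [(lines.length : Int)]
  else bGo (lines.length : Int) [] [] headings.reverse

-- ===== PRECONDITION & SPEC =====
def Spec_compute_line_end_py (lines : List String) (headings : List (Int × Int × String)) (out : List Int) : Prop := out = compute_line_end_py_alt lines headings
instance (lines : List String) (headings : List (Int × Int × String)) (out : List Int) : Decidable (Spec_compute_line_end_py lines headings out) := by unfold Spec_compute_line_end_py; infer_instance

-- ===== CLAIM (what is proved, stated in full; the proofs are below) =====
def Claim_equal_compute_line_end_py : Prop := ∀ (lines : List String) (headings : List (Int × Int × String)), Dom_compute_line_end_py lines headings → Spec_compute_line_end_py lines headings (compute_line_end_py lines headings)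

-- ===== LEMMAS AND PROOFS =====

-- common specification: for one heading of level l, the 'end' value determined by the
-- remaining headings (first later heading of level ≤ l, else n)
def nxt (n l : Int) : List (Int × Int × String) → Int
  | [] => n
  | (s, lv, _) :: rest => if lv ≤ l then s - 1 else nxt n l rest

def specList (n : Int) : List (Int × Int × String) → List Int
  | [] => []
  | (s, l, _) :: rest => max s (nxt n l rest) :: specList n rest

-- the same 'first hit' read off a (start, level) stack
def stNxt (n q : Int) : List (Int × Int) → Int
  | [] => n
  | (s, l) :: rest => if l ≤ q then s - 1 else stNxt n q rest

-- ---- A side ----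

theorem aInner_eq (full : List (Int × Int × String)) (level n : Int) :
    ∀ (fuel k : Nat), full.length - k ≤ fuel →
      aInner full level n (PySem.List.pyRange (k : Int) (full.length : Int) 1)
        = nxt n level (full.drop k) := by
  intro fuel
  induction fuel with
  | zero =>
    intro k hk
    have hlen : full.length ≤ k := by omega
    rw [PySem.List.pyRange_one_eq_nil (by exact_mod_cast hlen), List.drop_of_length_le hlen]
    rfl
  | succ m ih =>
    intro k hk
    by_cases h : k < full.length
    · rcases hfk : full[k] with ⟨s, l, t⟩
      rw [PySem.List.pyRange_one_cons (by exact_mod_cast h), List.drop_eq_getElem_cons h, hfk]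
      unfold aInner
      rw [PySem.List.pyGet?_natCast full k, List.getElem?_eq_getElem h, hfk]
      by_cases hle : l ≤ level
      · simp [nxt, hle]
      · have hc : ((k : Int) + 1) = ((k + 1 : Nat) : Int) := by push_cast; ring
        simp only [nxt, hle, if_false]
        rw [hc]
        exact ih (k + 1) (by omega)
    · have hlen : full.length ≤ k := by omega
      rw [PySem.List.pyRange_one_eq_nil (by exact_mod_cast hlen), List.drop_of_length_le hlen]
      rfl

theorem enum_map_eq (full : List (Int × Int × String)) (n : Int) :
    ∀ (hs : List (Int × Int × String)) (i : Nat), full.drop i = hs →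
      (PySem.List.enumerate hs (i : Int)).map
          (fun p => max p.2.1
            (aInner full p.2.2.1 n (PySem.List.pyRange (p.1 + 1) (full.length : Int) 1)))
        = specList n hs := by
  intro hs
  induction hs with
  | nil => intro i _; rfl
  | cons x t iht =>
    intro i hdrop
    obtain ⟨s, l, txt⟩ := x
    rw [PySem.List.enumerate_cons]
    simp only [List.map_cons]
    have hlt : i < full.length := by
      by_contra h
      rw [List.drop_of_length_le (by omega)] at hdrop
      exact List.cons_ne_nil _ _ hdrop.symm
    have hdrop1 : full.drop (i + 1) = t := by
      rw [List.drop_add_one_eq_tail_drop, hdrop, List.tail_cons]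
    have hcast : ((i : Int) + 1) = ((i + 1 : Nat) : Int) := by push_cast; ring
    rw [hcast, aInner_eq full l n (full.length - (i+1)) (i+1) le_rfl, hdrop1,
        iht (i + 1) hdrop1]
    rfl

theorem portA_eq_spec (lines : List String) (headings : List (Int × Int × String))
    (h : headings ≠ []) :
    compute_line_end_py lines headings = specList (lines.length : Int) headings := by
  unfold compute_line_end_py
  rw [if_neg h, PySem.List.foldl_append_singleton_eq_map, List.nil_append]
  exact enum_map_eq headings (lines.length : Int) headings 0 rfl

-- ---- B side ----

theorem bPop_stNxt (n level : Int) (stack : List (Int × Int)) :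
    ∀ q, q < level → stNxt n q (bPop level stack) = stNxt n q stack := by
  induction stack with
  | nil => intro q _; rfl
  | cons p rest ih =>
    intro q hq
    obtain ⟨s, l⟩ := p
    by_cases h : l > level
    · rw [show bPop level ((s, l) :: rest) = bPop level rest by simp [bPop, h]]
      have : ¬ l ≤ q := by omega
      rw [ih q hq, stNxt, if_neg this]
    · simp [bPop, h]

theorem bPop_head (n level : Int) (stack : List (Int × Int)) :
    bEnd n (bPop level stack) = stNxt n level stack := by
  induction stack with
  | nil => rfl
  | cons p rest ih =>
    obtain ⟨s, l⟩ := p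
    by_cases h : l > level
    · rw [show bPop level ((s, l) :: rest) = bPop level rest by simp [bPop, h]]
      have : ¬ l ≤ level := by omega
      rw [ih, stNxt, if_neg this]
    · have hle : l ≤ level := by omega
      rw [show bPop level ((s, l) :: rest) = (s, l) :: rest by simp [bPop, h]]
      show s - 1 = stNxt n level ((s, l) :: rest)
      simp [stNxt, hle]

theorem bGo_spec (n : Int) (todo : List (Int × Int × String)) :
    ∀ (done : List (Int × Int × String)) (stack : List (Int × Int)),
      (∀ q, stNxt n q stack = nxt n q done) →
      bGo n stack (specList n done) todo.reverse = specList n (todo ++ done) := by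
  induction todo using List.reverseRecOn with
  | nil => intro done stack _; rfl
  | append_singleton ys x ih =>
    intro done stack hinv
    obtain ⟨s, l, t⟩ := x
    rw [List.reverse_append, List.reverse_singleton, List.singleton_append]
    show bGo n ((s, l) :: bPop l stack)
        (max s (bEnd n (bPop l stack)) :: specList n done) ys.reverse = _
    rw [bPop_head n l stack, hinv l]
    have hs : specList n ((s, l, t) :: done) = max s (nxt n l done) :: specList n done := rfl
    rw [← hs]
    have hinv' : ∀ q, stNxt n q ((s, l) :: bPop l stack) = nxt n q ((s, l, t) :: done) := by
      intro q
      by_cases hq : l ≤ q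
      · simp [stNxt, nxt, hq]
      · have hlt : q < l := by omega
        rw [stNxt, if_neg hq, nxt, if_neg hq, bPop_stNxt n l stack q hlt, hinv q]
    rw [ih ((s, l, t) :: done) ((s, l) :: bPop l stack) hinv']
    simp

theorem portB_eq_spec (lines : List String) (headings : List (Int × Int × String))
    (h : headings ≠ []) :
    compute_line_end_py_alt lines headings = specList (lines.length : Int) headings := by
  unfold compute_line_end_py_alt
  rw [if_neg h]
  have := bGo_spec (lines.length : Int) headings [] [] (fun q => rfl)
  simpa using this

-- ===== VERDICT (by name: the statement is the Claim_ definition above) =====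
theorem compute_line_end_py_spec : Claim_equal_compute_line_end_py := by
  intro lines headings _
  unfold Spec_compute_line_end_py
  by_cases h : headings = []
  · subst h; rfl
  · rw [portA_eq_spec lines headings h, portB_eq_spec lines headings h]
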